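-- pv_equiv track=rewrite | github.com/syj-student/Study | problem/programmers/lv3/행렬과연산.py | solution
-- ===== SOURCE A (Python) =====
-- import collections
--
-- def solution(rc, operations):
--     def ShiftRow():
--         rc.rotate()
--         side_left.rotate()
--         side_right.rotate()
--
--     def Rotate():
--         rc[-1].append(side_right.pop())
--         rc[0].appendleft(side_left.popleft())
--         side_right.appendleft(rc[0].pop())
--         side_left.append(rc[-1].popleft())
--
--     rc = collections.deque(map(collections.deque, rc))
--     side_left = collections.deque()
--     side_right = collections.deque()
--     for l in rc:
--         side_left.append(l.popleft())
--         side_right.append(l.pop())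
--     for c in operations:
--         if c[0] == "R":
--             Rotate()
--         else:
--             ShiftRow()
--
--     for l in rc:
--         l.appendleft(side_left.popleft())
--         l.append(side_right.popleft())
--     return list(map(list, rc))
-- ===== SOURCE B (Python) =====
-- # B: plain list-of-lists; Rotate = one clockwise step of the border ring collected
-- # into a single list; ShiftRow = move the last row to the front.
-- def _rotate(g):
--     if len(g) < 2:
--         return g  # fewer than 2 rows: no ring to rotate
--     top, bottom, mid = g[0], g[-1], g[1:-1]
--     ring = top + [r[-1] for r in mid] + bottom[::-1] + [r[0] for r in mid][::-1]
--     ring = ring[-1:] + ring[:-1]  # one clockwise step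
--     new_top, ring = ring[:len(top)], ring[len(top):]
--     rights, ring = ring[:len(mid)], ring[len(mid):]
--     new_bottom_rev, ring = ring[:len(bottom)], ring[len(bottom):]
--     lefts = ring[::-1]
--     new_mid = [[l] + r[1:-1] + [s] for l, r, s in zip(lefts, mid, rights)]
--     return [new_top] + new_mid + [new_bottom_rev[::-1]]
--
-- def solution(rc, operations):
--     g = [list(r) for r in rc]
--     for op in operations:
--         g = _rotate(g) if op[0] == "R" else g[-1:] + g[:-1]
--     return g
-- ===== Notes on version B (the rewrite author's own statement) =====
-- stated objective: simpler
-- what changed: A threads three deques (peeled left/right side columns plus row interiors) through all operations and reassembles at the end; B keeps the plain list-of-lists matrix and performs each Rotate directly as one clockwise step of the border ring collected into a single list, and each ShiftRow as moving the last row to the front.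
import Mathlib
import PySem

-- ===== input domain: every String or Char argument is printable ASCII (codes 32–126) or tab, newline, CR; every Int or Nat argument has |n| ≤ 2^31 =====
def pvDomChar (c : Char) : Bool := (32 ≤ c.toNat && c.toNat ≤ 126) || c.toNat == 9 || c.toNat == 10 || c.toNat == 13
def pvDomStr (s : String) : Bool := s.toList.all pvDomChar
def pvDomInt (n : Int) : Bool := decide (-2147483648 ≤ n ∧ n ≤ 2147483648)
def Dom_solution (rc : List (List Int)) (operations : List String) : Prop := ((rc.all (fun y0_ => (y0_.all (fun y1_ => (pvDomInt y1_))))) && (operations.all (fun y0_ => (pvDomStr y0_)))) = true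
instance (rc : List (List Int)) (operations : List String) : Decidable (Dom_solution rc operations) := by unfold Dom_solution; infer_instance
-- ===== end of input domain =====

-- B is a simpler re-implementation: plain list-of-lists with Rotate done as one
-- clockwise step of the border ring collected into a single list; equivalence is
-- proved on inputs where A returns (rows of width ≥ 2, non-empty op strings,
-- and a non-empty matrix when a Rotate op occurs — elsewhere A raises).

-- moves the last element to the front: deque.rotate(1) in A, xs[-1:] + xs[:-1] in B
def pyRotR {α : Type} (l : List α) : List α :=
  match l.reverse with
  | [] => []
  | x :: t => x :: t.reverse

-- ===== PORT A =====
-- rc[0] = f(rc[0])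
def aMHead (f : List Int → List Int) : List (List Int) → List (List Int)
  | [] => []
  | m :: ms => f m :: ms

-- rc[-1] = f(rc[-1])
def aMLast (f : List Int → List Int) : List (List Int) → List (List Int)
  | [] => []
  | [m] => [f m]
  | m :: ms => m :: aMLast f ms

-- state = (rc as interiors, side_left, side_right)
def aRotate (st : List (List Int) × List Int × List Int) : List (List Int) × List Int × List Int :=
  let mid := st.1; let sl := st.2.1; let sr := st.2.2
  -- rc[-1].append(side_right.pop())
  let mid := aMLast (fun m => m ++ [sr.getLastD 0]) mid
  let sr := sr.dropLast
  -- rc[0].appendleft(side_left.popleft())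
  let mid := aMHead (fun m => sl.headD 0 :: m) mid
  let sl := sl.tail
  -- side_right.appendleft(rc[0].pop())
  let sr := (mid.headD []).getLastD 0 :: sr
  let mid := aMHead List.dropLast mid
  -- side_left.append(rc[-1].popleft())
  let sl := sl ++ [(mid.getLastD []).headD 0]
  let mid := aMLast List.tail mid
  (mid, sl, sr)

-- ShiftRow: rc.rotate(); side_left.rotate(); side_right.rotate()
def aShift (st : List (List Int) × List Int × List Int) : List (List Int) × List Int × List Int :=
  (pyRotR st.1, pyRotR st.2.1, pyRotR st.2.2)

-- final loop: for l in rc: l.appendleft(side_left.popleft()); l.append(side_right.popleft())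
def aReasm : List (List Int) → List Int → List Int → List (List Int)
  | m :: ms, a :: as_, b :: bs => (a :: m ++ [b]) :: aReasm ms as_ bs
  | _, _, _ => []

def solution (rc : List (List Int)) (operations : List String) : List (List Int) :=
  -- for l in rc: side_left.append(l.popleft()); side_right.append(l.pop())
  let st : List (List Int) × List Int × List Int :=
    rc.foldl (fun st l => (st.1 ++ [l.tail.dropLast], st.2.1 ++ [l.headD 0], st.2.2 ++ [l.tail.getLastD 0])) ([], [], [])
  let st := operations.foldl (fun st c => if c.toList.headD ' ' = 'R' then aRotate st else aShift st) st
  aReasm st.1 st.2.1 st.2.2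

-- ===== PORT B =====
-- [[l] + r[1:-1] + [s] for l, r, s in zip(lefts, mid, rights)]
def bZip3Rows : List Int → List (List Int) → List Int → List (List Int)
  | l :: ls, r :: rs, s :: ss => (l :: r.tail.dropLast ++ [s]) :: bZip3Rows ls rs ss
  | _, _, _ => []

def bRotate (g : List (List Int)) : List (List Int) :=
  if g.length < 2 then g  -- fewer than 2 rows: no ring to rotate
  else
    let top := g.headD []
    let bottom := g.getLastD []
    let mid := g.tail.dropLast  -- g[1:-1]
    let ring := top ++ mid.map (fun r => r.getLastD 0) ++ bottom.reverse ++ (mid.map (fun r => r.headD 0)).reverse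
    let ring1 := pyRotR ring    -- ring[-1:] + ring[:-1]
    let newTop := ring1.take top.length
    let ring2 := ring1.drop top.length
    let rights := ring2.take mid.length
    let ring3 := ring2.drop mid.length
    let newBottomRev := ring3.take bottom.length
    let ring4 := ring3.drop bottom.length
    let lefts := ring4.reverse
    newTop :: bZip3Rows lefts mid rights ++ [newBottomRev.reverse]

def solution_alt (rc : List (List Int)) (operations : List String) : List (List Int) :=
  operations.foldl (fun g op => if op.toList.headD ' ' = 'R' then bRotate g else pyRotR g)
    (rc.map (fun r => r))

-- ===== PRECONDITION & SPEC =====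
-- Pre_ excludes exactly the inputs where A raises: a row of width < 2 (the peel
-- loop pops twice from it), an empty operation string (c[0] IndexError), and a
-- Rotate op on an empty matrix (rc[-1] IndexError).
def Pre_solution (rc : List (List Int)) (operations : List String) : Prop :=
  (∀ r ∈ rc, 2 ≤ r.length) ∧ (∀ op ∈ operations, op ≠ "") ∧
  ((∃ op ∈ operations, op.toList.headD ' ' = 'R') → 1 ≤ rc.length)
instance (rc : List (List Int)) (operations : List String) : Decidable (Pre_solution rc operations) := by unfold Pre_solution; infer_instance

def pvWitness_solution : List (List Int) × List String := ([[1, 2, 3], [4, 5, 6]], ["Rotate", "ShiftRow", "Rotate"])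

def Spec_solution (rc : List (List Int)) (operations : List String) (out : List (List Int)) : Prop := out = solution_alt rc operations
instance (rc : List (List Int)) (operations : List String) (out : List (List Int)) : Decidable (Spec_solution rc operations out) := by unfold Spec_solution; infer_instance

-- ===== CLAIM (what is proved, stated in full; the proofs are below) =====
def Claim_equal_solution : Prop := ∀ (rc : List (List Int)) (operations : List String), Dom_solution rc operations → Pre_solution rc operations → Spec_solution rc operations (solution rc operations)

-- ===== LEMMAS AND PROOFS =====

lemma pyRotR_concat {α : Type} (xs : List α) (x : α) : pyRotR (xs ++ [x]) = x :: xs := by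
  simp [pyRotR]
lemma concat_eta {α : Type} (a : α) (l : List α) (d : α) :
    (a :: l).dropLast ++ [(a :: l).getLastD d] = a :: l := by
  induction l generalizing a with
  | nil => simp
  | cons b t ih => simpa using congrArg (a :: ·) (ih b)
lemma aMLast_concat (f : List Int → List Int) (xs : List (List Int)) (x : List Int) :
    aMLast f (xs ++ [x]) = xs ++ [f x] := by
  induction xs with
  | nil => rfl
  | cons a xs ih => cases xs <;> simp_all [aMLast]
lemma reasm_append (ms : List (List Int)) (as_ bs : List Int) (m : List Int) (a b : Int)
    (h1 : as_.length = ms.length) (h2 : bs.length = ms.length) :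
    aReasm (ms ++ [m]) (as_ ++ [a]) (bs ++ [b]) = aReasm ms as_ bs ++ [a :: m ++ [b]] := by
  induction ms generalizing as_ bs with
  | nil => cases as_ <;> cases bs <;> simp_all [aReasm]
  | cons m0 ms ih =>
    cases as_ with
    | nil => simp at h1
    | cons a0 as_ => cases bs with
      | nil => simp at h2
      | cons b0 bs => simp_all [aReasm]
lemma reasm_length (ms : List (List Int)) (as_ bs : List Int)
    (h1 : as_.length = ms.length) (h2 : bs.length = ms.length) :
    (aReasm ms as_ bs).length = ms.length := by
  induction ms generalizing as_ bs with
  | nil => simp [aReasm]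
  | cons m0 ms ih =>
    cases as_ with
    | nil => simp at h1
    | cons a0 as_ => cases bs with
      | nil => simp at h2
      | cons b0 bs => simp_all [aReasm]
lemma getLast?_cons_concat {α : Type} (a : α) (m : List α) (b : α) :
    (a :: (m ++ [b])).getLast? = some b := by
  rw [← List.cons_append]; exact List.getLast?_concat
lemma map_getLastD_reasm (ms : List (List Int)) (as_ bs : List Int)
    (h1 : as_.length = ms.length) (h2 : bs.length = ms.length) :
    (aReasm ms as_ bs).map (fun r => r.getLastD 0) = bs := by
  induction ms generalizing as_ bs with
  | nil => cases bs <;> simp_all [aReasm]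
  | cons m0 ms ih =>
    cases as_ with
    | nil => simp at h1
    | cons a0 as_ => cases bs with
      | nil => simp at h2
      | cons b0 bs =>
        simp_all [aReasm]
        rw [getLast?_cons_concat]
        rfl
lemma map_headD_reasm (ms : List (List Int)) (as_ bs : List Int)
    (h1 : as_.length = ms.length) (h2 : bs.length = ms.length) :
    (aReasm ms as_ bs).map (fun r => r.headD 0) = as_ := by
  induction ms generalizing as_ bs with
  | nil => cases as_ <;> simp_all [aReasm]
  | cons m0 ms ih =>
    cases as_ with
    | nil => simp at h1
    | cons a0 as_ => cases bs with
      | nil => simp at h2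
      | cons b0 bs => simp_all [aReasm]
lemma zip3_reasm (ms : List (List Int)) (as_ bs xs ys : List Int)
    (h1 : as_.length = ms.length) (h2 : bs.length = ms.length) :
    bZip3Rows xs (aReasm ms as_ bs) ys = aReasm ms xs ys := by
  induction ms generalizing as_ bs xs ys with
  | nil => cases as_ <;> cases xs <;> cases ys <;> simp_all [aReasm, bZip3Rows]
  | cons m0 ms ih =>
    cases as_ with
    | nil => simp at h1
    | cons a0 as_ => cases bs with
      | nil => simp at h2
      | cons b0 bs =>
        cases xs with
        | nil => simp [aReasm, bZip3Rows]
        | cons x xs => cases ys with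
          | nil => simp [aReasm, bZip3Rows]
          | cons y ys => simp_all [aReasm, bZip3Rows]
lemma getLastD_reverse {α : Type} (l : List α) (d : α) : l.reverse.getLastD d = l.headD d := by
  cases l with
  | nil => rfl
  | cons a t => simp
lemma pyRotR_length {α : Type} (l : List α) : (pyRotR l).length = l.length := by
  rcases List.eq_nil_or_concat l with h | ⟨xs, x, h⟩ <;> subst h <;> simp [pyRotR]
lemma shift_eq (ms : List (List Int)) (as_ bs : List Int)
    (h1 : as_.length = ms.length) (h2 : bs.length = ms.length) :
    aReasm (pyRotR ms) (pyRotR as_) (pyRotR bs) = pyRotR (aReasm ms as_ bs) := by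
  rcases List.eq_nil_or_concat ms with h | ⟨ms', m, h⟩
  · subst h; cases as_ <;> cases bs <;> simp_all [aReasm, pyRotR]
  · subst h
    rcases List.eq_nil_or_concat as_ with ha | ⟨as', a, ha⟩
    · subst ha; simp at h1
    rcases List.eq_nil_or_concat bs with hb | ⟨bs', b, hb⟩
    · subst hb; simp at h2
    subst ha; subst hb
    simp only [List.concat_eq_append] at h1 h2 ⊢
    have e1 : as'.length = ms'.length := by simp at h1; omega
    have e2 : bs'.length = ms'.length := by simp at h2; omega
    rw [pyRotR_concat, pyRotR_concat, pyRotR_concat,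
        reasm_append ms' as' bs' m a b e1 e2, pyRotR_concat]
    rfl
lemma getLastD_cons_concat' {α : Type} (a : α) (m : List α) (b d : α) :
    (a :: (m ++ [b])).getLastD d = b := by
  simp [List.getLastD_eq_getLast?, getLast?_cons_concat]
lemma dropLast_cons_concat {α : Type} (a : α) (m : List α) (b : α) :
    (a :: (m ++ [b])).dropLast = a :: m := by
  rw [← List.cons_append]; exact List.dropLast_concat
lemma aMLast_cons_concat (f : List Int → List Int) (a : List Int) (ms : List (List Int)) (x : List Int) :
    aMLast f (a :: (ms ++ [x])) = a :: (ms ++ [f x]) := by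
  rw [← List.cons_append, aMLast_concat, List.cons_append]
lemma cons_eta {α : Type} (l : List α) (d : α) (h : l ≠ []) : l.headD d :: l.tail = l := by
  cases l with | nil => exact absurd rfl h | cons a t => rfl

lemma aRotate_one (m : List Int) (l s : Int) : aRotate ([m], [l], [s]) = ([m], [l], [s]) := by
  simp [aRotate, aMLast, aMHead, getLast?_cons_concat, dropLast_cons_concat]

lemma aRotate_big (m₀ mN : List Int) (ms : List (List Int)) (l₀ lN s₀ sN : Int) (ls ss : List Int) :
    aRotate (m₀ :: (ms ++ [mN]), l₀ :: (ls ++ [lN]), s₀ :: (ss ++ [sN]))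
    = ((l₀ :: m₀).dropLast :: (ms ++ [(mN ++ [sN]).tail]),
       (ls ++ [lN]) ++ [(mN ++ [sN]).headD 0],
       (l₀ :: m₀).getLastD 0 :: (s₀ :: ss)) := by
  simp only [aRotate, aMHead, aMLast_cons_concat, getLastD_cons_concat', dropLast_cons_concat,
    List.headD_cons, List.tail_cons]

lemma getLastD_append_right {α : Type} (l₁ l₂ : List α) (d : α) (h : l₂ ≠ []) :
    (l₁ ++ l₂).getLastD d = l₂.getLastD d := by
  cases l₂ with
  | nil => exact absurd rfl h
  | cons a t =>
    simp only [List.getLastD_eq_getLast?, List.getLast?_append]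
    cases h' : (a :: t).getLast? with
    | none => simp at h'
    | some x => simp
lemma pyRotR_eq_cons {α : Type} (l : List α) (d : α) (h : l ≠ []) :
    pyRotR l = l.getLastD d :: l.dropLast := by
  rcases List.eq_nil_or_concat l with h' | ⟨xs, x, h'⟩
  · exact absurd h' h
  · subst h'; simp only [List.concat_eq_append]
    rw [pyRotR_concat, List.getLastD_concat, List.dropLast_concat]
lemma rot_rhs (m₀ mN : List Int) (ms : List (List Int)) (l₀ lN s₀ sN : Int) (ls ss : List Int)
    (hl : ls.length = ms.length) (hs : ss.length = ms.length) :
    bRotate ((l₀ :: (m₀ ++ [s₀])) :: (aReasm ms ls ss ++ [lN :: (mN ++ [sN])]))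
    = ((ls ++ [lN]).headD 0 :: (l₀ :: m₀))
      :: (aReasm ms (ls ++ [lN]).tail (s₀ :: ss).dropLast
          ++ [(mN ++ [sN]) ++ [(s₀ :: ss).getLastD 0]]) := by
  have hlen : (aReasm ms ls ss).length = ms.length := reasm_length _ _ _ hl hs
  simp only [bRotate]
  rw [if_neg (by simp [hlen])]
  simp only [List.headD_cons, List.tail_cons, List.dropLast_concat, getLastD_cons_concat',
    map_getLastD_reasm ms ls ss hl hs, map_headD_reasm ms ls ss hl hs]
  rw [show l₀ :: (m₀ ++ [s₀]) ++ ss ++ (lN :: (mN ++ [sN])).reverse ++ ls.reverse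
      = (l₀ :: (m₀ ++ [s₀])) ++ (ss ++ ((sN :: mN.reverse) ++ (ls ++ [lN]).reverse)) from by simp]
  rw [pyRotR_eq_cons _ (0:Int) (by simp)]
  rw [show ((l₀ :: (m₀ ++ [s₀])) ++ (ss ++ ((sN :: mN.reverse) ++ (ls ++ [lN]).reverse))).getLastD 0
      = (ls ++ [lN]).headD 0 from by
        rw [getLastD_append_right, getLastD_append_right, getLastD_append_right, getLastD_reverse] <;> simp]
  rw [show ((l₀ :: (m₀ ++ [s₀])) ++ (ss ++ ((sN :: mN.reverse) ++ (ls ++ [lN]).reverse))).dropLast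
      = (l₀ :: m₀) ++ ((s₀ :: ss).dropLast ++ (((s₀ :: ss).getLastD 0 :: (sN :: mN.reverse)) ++ (ls ++ [lN]).tail.reverse)) from by
        rw [List.dropLast_append_of_ne_nil (by simp), List.dropLast_append_of_ne_nil (by simp),
            List.dropLast_append_of_ne_nil (by simp), List.dropLast_reverse]
        rw [show (s₀ :: ss).dropLast ++ ((s₀ :: ss).getLastD 0 :: (sN :: mN.reverse) ++ (ls ++ [lN]).tail.reverse)
            = ((s₀ :: ss).dropLast ++ [(s₀ :: ss).getLastD 0]) ++ ((sN :: mN.reverse) ++ (ls ++ [lN]).tail.reverse) from by simp]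
        rw [concat_eta]
        simp]
  rw [show (ls ++ [lN]).headD 0 :: (l₀ :: m₀ ++ ((s₀ :: ss).dropLast ++ ((s₀ :: ss).getLastD 0 :: sN :: mN.reverse ++ (ls ++ [lN]).tail.reverse)))
      = ((ls ++ [lN]).headD 0 :: l₀ :: m₀) ++ ((s₀ :: ss).dropLast ++ (((s₀ :: ss).getLastD 0 :: sN :: mN.reverse) ++ (ls ++ [lN]).tail.reverse)) from by simp]
  rw [List.take_left' (show (((ls ++ [lN]).headD 0 :: l₀ :: m₀)).length = (l₀ :: (m₀ ++ [s₀])).length from by simp),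
      List.drop_left' (show (((ls ++ [lN]).headD 0 :: l₀ :: m₀)).length = (l₀ :: (m₀ ++ [s₀])).length from by simp)]
  rw [List.take_left' (show ((s₀ :: ss).dropLast).length = (aReasm ms ls ss).length from by simp [hlen, hs]),
      List.drop_left' (show ((s₀ :: ss).dropLast).length = (aReasm ms ls ss).length from by simp [hlen, hs])]
  rw [List.take_left' (show (((s₀ :: ss).getLastD 0 :: sN :: mN.reverse)).length = (lN :: (mN ++ [sN])).length from by simp),
      List.drop_left' (show (((s₀ :: ss).getLastD 0 :: sN :: mN.reverse)).length = (lN :: (mN ++ [sN])).length from by simp)]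
  rw [List.reverse_reverse, zip3_reasm ms ls ss _ _ hl hs]
  simp
lemma reasm_cons_ne (m : List Int) (ms : List (List Int)) (as_ bs : List Int)
    (ha : as_ ≠ []) (hb : bs ≠ []) :
    aReasm (m :: ms) as_ bs = (as_.headD 0 :: (m ++ [bs.headD 0])) :: aReasm ms as_.tail bs.tail := by
  cases as_ with
  | nil => exact absurd rfl ha
  | cons a t => cases bs with
    | nil => exact absurd rfl hb
    | cons b u => rfl

lemma rot_lhs (m₀ mN : List Int) (ms : List (List Int)) (l₀ lN s₀ sN : Int) (ls ss : List Int)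
    (hl : ls.length = ms.length) (hs : ss.length = ms.length) :
    aReasm ((l₀ :: m₀).dropLast :: (ms ++ [(mN ++ [sN]).tail]))
           ((ls ++ [lN]) ++ [(mN ++ [sN]).headD 0])
           ((l₀ :: m₀).getLastD 0 :: (s₀ :: ss))
    = ((ls ++ [lN]).headD 0 :: (l₀ :: m₀))
      :: (aReasm ms (ls ++ [lN]).tail (s₀ :: ss).dropLast
          ++ [(mN ++ [sN]) ++ [(s₀ :: ss).getLastD 0]]) := by
  conv_lhs => rw [← concat_eta s₀ ss 0]
  rw [show (l₀ :: m₀).dropLast :: (ms ++ [(mN ++ [sN]).tail])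
      = ((l₀ :: m₀).dropLast :: ms) ++ [(mN ++ [sN]).tail] from by simp,
      show (l₀ :: m₀).getLastD 0 :: ((s₀ :: ss).dropLast ++ [(s₀ :: ss).getLastD 0])
      = ((l₀ :: m₀).getLastD 0 :: (s₀ :: ss).dropLast) ++ [(s₀ :: ss).getLastD 0] from by simp]
  rw [reasm_append _ _ _ _ _ _ (by simp [hl]) (by simp [hs])]
  rw [reasm_cons_ne _ _ _ _ (by simp) (by simp)]
  simp only [List.headD_cons, List.tail_cons]
  rw [concat_eta l₀ m₀ 0]
  rw [cons_eta (mN ++ [sN]) 0 (by simp)]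
  simp
lemma rot_step (ms : List (List Int)) (as_ bs : List Int)
    (h1 : as_.length = ms.length) (h2 : bs.length = ms.length) (hn : 1 ≤ ms.length) :
    aReasm (aRotate (ms, as_, bs)).1 (aRotate (ms, as_, bs)).2.1 (aRotate (ms, as_, bs)).2.2
      = bRotate (aReasm ms as_ bs)
    ∧ (aRotate (ms, as_, bs)).1.length = ms.length
    ∧ (aRotate (ms, as_, bs)).2.1.length = ms.length
    ∧ (aRotate (ms, as_, bs)).2.2.length = ms.length := by
  cases ms with
  | nil => simp at hn
  | cons m0 ms' =>
    rcases List.eq_nil_or_concat ms' with rfl | ⟨ms'', mN, rfl⟩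
    · -- single row
      cases as_ with
      | nil => simp at h1
      | cons a0 as1 => cases bs with
        | nil => simp at h2
        | cons b0 bs1 =>
          have ha : as1 = [] := by simpa using h1
          have hb : bs1 = [] := by simpa using h2
          subst ha; subst hb
          rw [aRotate_one]
          refine ⟨?_, by simp, by simp, by simp⟩
          rw [show bRotate (aReasm [m0] [a0] [b0]) = aReasm [m0] [a0] [b0] from by
            rw [bRotate]; rw [if_pos (by simp [aReasm])]]
    · -- at least two rows
      simp only [List.concat_eq_append] at *
      cases as_ with
      | nil => simp at h1
      | cons a0 as1 => cases bs with
        | nil => simp at h2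
        | cons b0 bs1 =>
          rcases List.eq_nil_or_concat as1 with rfl | ⟨ls, lN, rfl⟩
          · simp at h1
          rcases List.eq_nil_or_concat bs1 with rfl | ⟨ss, sN, rfl⟩
          · simp at h2
          simp only [List.concat_eq_append] at *
          have hl : ls.length = ms''.length := by simp at h1; omega
          have hs : ss.length = ms''.length := by simp at h2; omega
          rw [aRotate_big]
          refine ⟨?_, by simp, by simp [hl], by simp [hs]⟩
          rw [rot_lhs m0 mN ms'' a0 lN b0 sN ls ss hl hs]
          rw [show aReasm (m0 :: (ms'' ++ [mN])) (a0 :: (ls ++ [lN])) (b0 :: (ss ++ [sN]))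
              = (a0 :: (m0 ++ [b0])) :: (aReasm ms'' ls ss ++ [lN :: (mN ++ [sN])]) from by
            rw [reasm_cons_ne _ _ _ _ (by simp) (by simp)]
            simp only [List.headD_cons, List.tail_cons]
            rw [reasm_append _ _ _ _ _ _ hl hs]
            simp]
          rw [rot_rhs m0 mN ms'' a0 lN b0 sN ls ss hl hs]
lemma loop_eq (ops : List String) : ∀ (ms : List (List Int)) (as_ bs : List Int),
    as_.length = ms.length → bs.length = ms.length →
    ((∃ op ∈ ops, op.toList.headD ' ' = 'R') → 1 ≤ ms.length) →
    (let st := ops.foldl (fun st c => if c.toList.headD ' ' = 'R' then aRotate st else aShift st) (ms, as_, bs)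
     aReasm st.1 st.2.1 st.2.2)
    = ops.foldl (fun g op => if op.toList.headD ' ' = 'R' then bRotate g else pyRotR g) (aReasm ms as_ bs) := by
  induction ops with
  | nil => intro ms as_ bs _ _ _; rfl
  | cons op rest ih =>
    intro ms as_ bs h1 h2 hcond
    simp only [List.foldl_cons]
    by_cases hR : op.toList.headD ' ' = 'R'
    · have hn : 1 ≤ ms.length := hcond ⟨op, List.mem_cons_self, hR⟩
      obtain ⟨heq, hm, ha, hb⟩ := rot_step ms as_ bs h1 h2 hn
      rw [if_pos hR, if_pos hR]
      have := ih (aRotate (ms, as_, bs)).1 (aRotate (ms, as_, bs)).2.1 (aRotate (ms, as_, bs)).2.2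
        (ha.trans hm.symm) (hb.trans hm.symm)
        (fun h => hm ▸ hcond (by rcases h with ⟨o, ho, hro⟩; exact ⟨o, List.mem_cons_of_mem _ ho, hro⟩))
      simp only [Prod.mk.eta] at this
      rw [this, heq]
    · rw [if_neg hR, if_neg hR]
      have := ih (aShift (ms, as_, bs)).1 (aShift (ms, as_, bs)).2.1 (aShift (ms, as_, bs)).2.2
        (by simp [aShift, pyRotR_length, h1]) (by simp [aShift, pyRotR_length, h2])
        (fun h => by
          simp only [aShift, pyRotR_length]
          exact hcond (by rcases h with ⟨o, ho, hro⟩; exact ⟨o, List.mem_cons_of_mem _ ho, hro⟩))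
      simp only [Prod.mk.eta] at this
      rw [this]
      simp only [aShift]
      rw [shift_eq ms as_ bs h1 h2]
lemma peel_eq (rc : List (List Int)) : ∀ acc : List (List Int) × List Int × List Int,
    rc.foldl (fun st l => (st.1 ++ [l.tail.dropLast], st.2.1 ++ [l.headD 0], st.2.2 ++ [l.tail.getLastD 0])) acc
    = (acc.1 ++ rc.map (fun l => l.tail.dropLast), acc.2.1 ++ rc.map (fun l => l.headD 0),
       acc.2.2 ++ rc.map (fun l => l.tail.getLastD 0)) := by
  induction rc with
  | nil => intro acc; simp
  | cons r rc ih => intro acc; rw [List.foldl_cons, ih]; simp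

lemma glue_peel (rc : List (List Int)) (h : ∀ r ∈ rc, 2 ≤ r.length) :
    aReasm (rc.map (fun l => l.tail.dropLast)) (rc.map (fun l => l.headD 0))
           (rc.map (fun l => l.tail.getLastD 0)) = rc := by
  induction rc with
  | nil => rfl
  | cons r rc ih =>
    have hr := h r (List.mem_cons_self)
    match r, hr with
    | a :: c :: u, _ =>
      simp only [List.map_cons, aReasm, List.headD_cons, List.tail_cons]
      rw [show a :: (c :: u).dropLast ++ [(c :: u).getLastD 0]
          = a :: ((c :: u).dropLast ++ [(c :: u).getLastD 0]) from by simp]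
      rw [concat_eta c u 0, ih (fun r hr' => h r (List.mem_cons_of_mem _ hr'))]

-- ===== VERDICT (by name: the statement is the Claim_ definition above) =====
theorem solution_spec : Claim_equal_solution := by
  intro rc ops _dom pre
  obtain ⟨hrows, _hne, hR⟩ := pre
  unfold Spec_solution solution solution_alt
  rw [peel_eq rc ([], [], [])]
  simp only [List.nil_append]
  have hcond : (∃ op ∈ ops, op.toList.headD ' ' = 'R') → 1 ≤ (rc.map (fun l => l.tail.dropLast)).length := by
    intro h; simpa using hR h
  have key := loop_eq ops (rc.map (fun l => l.tail.dropLast)) (rc.map (fun l => l.headD 0))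
    (rc.map (fun l => l.tail.getLastD 0)) (by simp) (by simp) hcond
  rw [glue_peel rc hrows] at key
  rw [show rc.map (fun r => r) = rc from by simp]
  exact key
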